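-- pv_equiv track=rewrite | github.com/pauliacomi/pyGAPS | src/pygaps/utilities/string_utilities.py | convert_unit_ltx
-- ===== SOURCE A (Python) =====
-- def convert_unit_ltx(string: str, negative: bool = False) -> str:
--     """
--     Convert a unit string to a nice matplotlib parsable format (latex).
--
--     Parameters
--     ----------
--     string: str
--         String to process.
--     negative: bool
--         Whether the power is negative instead.
--
--     Returns
--     -------
--     str
--         Processed string.
--     """
--     result = ""
--     number_processing = False
--     for i in string:
--         if i.isdigit():
--             if not number_processing:
--                 result += '^{'
--                 if negative:
--                     result += '-'
--                     negative = False
--                 number_processing = True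
--         else:
--             if number_processing:
--                 result += '}'
--                 number_processing = False
--             if i == "(":
--                 result += '_{'
--                 continue
--             if i == ")":
--                 result += '}'
--                 continue
--         result += (i)
--
--     if number_processing:
--         result += '}'
--
--     if negative:
--         result += '^{-1}'
--
--     return result
-- ===== SOURCE B (Python) =====
-- def convert_unit_ltx(string: str, negative: bool = False) -> str:
--     """Two-phase run scanner: consume maximal digit runs via an index scan,
--     translate other characters one by one; no number_processing state flag."""
--     out = []
--     i, n = 0, len(string)
--     neg = negative
--     while i < n:
--         if string[i].isdigit():
--             j = i
--             while j < n and string[j].isdigit():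
--                 j += 1
--             out.append('^{' + ('-' if neg else '') + string[i:j] + '}')
--             neg = False
--             i = j
--         else:
--             ch = string[i]
--             out.append('_{' if ch == '(' else '}' if ch == ')' else ch)
--             i += 1
--     if neg:
--         out.append('^{-1}')
--     return ''.join(out)
-- ===== Notes on version B (the rewrite author's own statement) =====
-- stated objective: alternative
-- what changed: Replaces A's per-character state machine with a number_processing flag by a run scanner that consumes each maximal digit run in one inner index scan and emits its whole superscript block at once; non-digit characters are mapped directly.
import Mathlib
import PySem

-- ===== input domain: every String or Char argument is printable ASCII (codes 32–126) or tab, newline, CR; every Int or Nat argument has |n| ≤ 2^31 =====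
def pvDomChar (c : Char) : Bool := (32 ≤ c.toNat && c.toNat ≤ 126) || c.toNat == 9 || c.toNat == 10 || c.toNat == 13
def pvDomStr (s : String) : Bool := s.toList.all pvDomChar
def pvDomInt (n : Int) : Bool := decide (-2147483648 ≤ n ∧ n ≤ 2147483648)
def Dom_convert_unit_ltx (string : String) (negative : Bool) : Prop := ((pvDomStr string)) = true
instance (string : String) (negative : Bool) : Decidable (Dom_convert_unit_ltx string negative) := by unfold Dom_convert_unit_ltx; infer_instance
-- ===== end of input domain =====

-- B replaces A's per-character number_processing state machine by a scanner that
-- consumes each maximal digit run at once and emits its whole superscript block in one step (alternative decomposition, same cost).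


-- ===== PORT A =====
-- state = (result, number_processing, negative); one step of A's for-loop body
def pvAStep (st : List Char × Bool × Bool) (c : Char) : List Char × Bool × Bool :=
  match st with
  | (result, np, neg) =>
    if PySem.Chars.isdigit c then
      if np then (result ++ [c], true, neg)
      else
        let r := result ++ "^{".toList
        if neg then (r ++ ['-'] ++ [c], true, false)
        else (r ++ [c], true, neg)
    else
      let r := if np then result ++ ['}'] else result
      if c = '(' then (r ++ "_{".toList, false, neg)
      else if c = ')' then (r ++ ['}'], false, neg)
      else (r ++ [c], false, neg)

def convert_unit_ltx (string : String) (negative : Bool) : String :=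
  match string.toList.foldl pvAStep ([], false, negative) with
  | (result, np, neg) =>
    let result := if np then result ++ ['}'] else result
    let result := if neg then result ++ "^{-1}".toList else result
    String.ofList result

-- ===== PORT B =====
-- B's while loop: at a digit, scan off the whole maximal digit run (takeWhile/dropWhile
-- = the inner j-scan and string[i:j] slice); otherwise translate one character.
def pvBGo : List Char → Bool → List Char
  | [], neg => if neg then "^{-1}".toList else []
  | c :: cs, neg =>
    if PySem.Chars.isdigit c then
      "^{".toList ++ (if neg then ['-'] else [])
        ++ (c :: cs).takeWhile PySem.Chars.isdigit ++ ['}']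
        ++ pvBGo ((c :: cs).dropWhile PySem.Chars.isdigit) false
    else
      (if c = '(' then "_{".toList else if c = ')' then ['}'] else [c]) ++ pvBGo cs neg
termination_by cs _ => cs.length
decreasing_by
  all_goals simp_all
  all_goals exact List.length_dropWhile_le _ _

def convert_unit_ltx_alt (string : String) (negative : Bool) : String :=
  String.ofList (pvBGo string.toList negative)

-- ===== PRECONDITION & SPEC =====
def Spec_convert_unit_ltx (string : String) (negative : Bool) (out : String) : Prop := out = convert_unit_ltx_alt string negative
instance (string : String) (negative : Bool) (out : String) : Decidable (Spec_convert_unit_ltx string negative out) := by unfold Spec_convert_unit_ltx; infer_instance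

-- ===== CLAIM (what is proved, stated in full; the proofs are below) =====
def Claim_equal_convert_unit_ltx : Prop := ∀ (string : String) (negative : Bool), Dom_convert_unit_ltx string negative → Spec_convert_unit_ltx string negative (convert_unit_ltx string negative)

-- ===== LEMMAS AND PROOFS =====

-- A's epilogue after the loop, as a function of the final state
def pvFin (st : List Char × Bool × Bool) : List Char :=
  match st with
  | (result, np, neg) =>
    let result := if np then result ++ ['}'] else result
    if neg then result ++ "^{-1}".toList else result

-- unfolding equations for the well-founded pvBGo
theorem pvBGo_nil (neg : Bool) : pvBGo [] neg = if neg then "^{-1}".toList else [] := by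
  rw [pvBGo.eq_def]

theorem pvBGo_cons (c : Char) (cs : List Char) (neg : Bool) :
    pvBGo (c :: cs) neg =
      if PySem.Chars.isdigit c then
        "^{".toList ++ (if neg then ['-'] else [])
          ++ (c :: cs).takeWhile PySem.Chars.isdigit ++ ['}']
          ++ pvBGo ((c :: cs).dropWhile PySem.Chars.isdigit) false
      else
        (if c = '(' then "_{".toList else if c = ')' then ['}'] else [c]) ++ pvBGo cs neg := by
  rw [pvBGo.eq_def]

-- joint invariant: the state machine from np=false equals B; from np=true (inside a digit
-- run, negative already consumed) it closes the current run then continues like B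
theorem pvJoint : ∀ (n : Nat) (cs : List Char), cs.length = n →
    (∀ (r : List Char) (neg : Bool),
        pvFin (cs.foldl pvAStep (r, false, neg)) = r ++ pvBGo cs neg) ∧
    (∀ (r : List Char),
        pvFin (cs.foldl pvAStep (r, true, false)) =
          r ++ cs.takeWhile PySem.Chars.isdigit ++ ['}']
            ++ pvBGo (cs.dropWhile PySem.Chars.isdigit) false) := by
  intro n
  induction n using Nat.strong_induction_on with
  | _ n ih =>
    intro cs hlen
    constructor
    · intro r neg
      match cs with
      | [] => cases neg <;> simp [pvFin, pvBGo_nil]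
      | c :: cs' =>
        by_cases hd : PySem.Chars.isdigit c = true
        · have haux := (ih cs'.length (by simp [← hlen]) cs' rfl).2
          rw [List.foldl_cons]
          cases neg <;>
            (simp only [pvAStep, hd, if_true, Bool.false_eq_true, if_false];
             rw [haux];
             simp [pvBGo_cons, hd])
        · have hmain := (ih cs'.length (by simp [← hlen]) cs' rfl).1
          have hdig : PySem.Chars.isdigit c = false := by simpa using hd
          rw [List.foldl_cons]
          simp only [pvAStep, hdig, Bool.false_eq_true, if_false]
          split_ifs with hp hq
          · subst hp; simp [pvBGo_cons, hdig, hmain]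
          · subst hq; simp [pvBGo_cons, hdig, hp, hmain]
          · simp [pvBGo_cons, hdig, hp, hq, hmain]
    · intro r
      match cs with
      | [] => simp [pvFin, pvBGo_nil]
      | c :: cs' =>
        by_cases hd : PySem.Chars.isdigit c = true
        · have haux := (ih cs'.length (by simp [← hlen]) cs' rfl).2
          rw [List.foldl_cons]
          simp only [pvAStep, hd, if_true]
          rw [haux]
          simp [hd]
        · have hmain := (ih cs'.length (by simp [← hlen]) cs' rfl).1
          have hdig : PySem.Chars.isdigit c = false := by simpa using hd
          rw [List.foldl_cons]
          simp only [List.takeWhile_cons, List.dropWhile_cons, hdig, Bool.false_eq_true, if_false]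
          simp only [pvAStep, hdig, Bool.false_eq_true, if_false]
          split_ifs with hp hq
          · subst hp; simp [pvBGo_cons, hdig, hmain]
          · subst hq; simp [pvBGo_cons, hdig, hp, hmain]
          · simp [pvBGo_cons, hdig, hp, hq, hmain]

-- ===== VERDICT (by name: the statement is the Claim_ definition above) =====
theorem convert_unit_ltx_spec : Claim_equal_convert_unit_ltx := by
  intro s neg _
  unfold Spec_convert_unit_ltx convert_unit_ltx convert_unit_ltx_alt
  have h := (pvJoint s.toList.length s.toList rfl).1 [] neg
  simp only [List.nil_append] at h
  rw [← h]
  rcases s.toList.foldl pvAStep ([], false, neg) with ⟨r, np, ng⟩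
  simp [pvFin]
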